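-- pv_equiv track=rewrite | github.com/MaxSteelOne/algoritmos-datos | 7guia/ejercicios.py | control_bancario
-- ===== SOURCE A (Python) =====
-- def control_bancario (xl: list[tuple[str,int]])->int:
--     acc=0
--     for i in xl:
--         if(i[0]=="I"):
--             acc+= i[1]
--         if(i[0]=="R"):
--             acc-= i[1]
--     return acc
-- ===== SOURCE B (Python) =====
-- def control_bancario(xl: list[tuple[str, int]]) -> int:
--     deposits = sum(v for t, v in xl if t == "I")
--     withdrawals = sum(v for t, v in xl if t == "R")
--     return deposits - withdrawals
-- ===== Notes on version B (the rewrite author's own statement) =====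
-- stated objective: simpler
-- what changed: Replaces the single signed-accumulator loop with two independent subset sums (deposits and withdrawals) combined by one subtraction at the end.
import Mathlib
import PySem

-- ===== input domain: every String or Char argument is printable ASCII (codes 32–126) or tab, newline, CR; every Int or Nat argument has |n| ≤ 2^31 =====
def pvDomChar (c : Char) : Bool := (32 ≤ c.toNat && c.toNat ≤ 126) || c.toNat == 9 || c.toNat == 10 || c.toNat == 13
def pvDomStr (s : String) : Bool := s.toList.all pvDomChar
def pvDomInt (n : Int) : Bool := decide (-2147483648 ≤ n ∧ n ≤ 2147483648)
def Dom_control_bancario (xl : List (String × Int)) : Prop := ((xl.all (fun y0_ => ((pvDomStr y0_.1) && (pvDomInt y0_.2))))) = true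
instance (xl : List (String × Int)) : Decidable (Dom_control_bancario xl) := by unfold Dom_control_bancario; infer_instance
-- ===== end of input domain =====

-- B replaces A's single signed-accumulator loop with two independent subset sums (deposits, withdrawals) subtracted at the end (objective: simpler).


-- ===== PORT A =====
def control_bancario (xl : List (String × Int)) : Int :=
  xl.foldl (fun acc i =>
    let acc := if i.1 == "I" then acc + i.2 else acc
    if i.1 == "R" then acc - i.2 else acc) 0

-- ===== PORT B =====
-- B: two independent subset sums (deposits, withdrawals), combined by one subtraction.
def control_bancario_alt (xl : List (String × Int)) : Int :=
  ((xl.filter (fun p => p.1 == "I")).map (·.2)).sum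
    - ((xl.filter (fun p => p.1 == "R")).map (·.2)).sum

-- ===== PRECONDITION & SPEC =====
def Spec_control_bancario (xl : List (String × Int)) (out : Int) : Prop := out = control_bancario_alt xl
instance (xl : List (String × Int)) (out : Int) : Decidable (Spec_control_bancario xl out) := by unfold Spec_control_bancario; infer_instance

-- ===== CLAIM (what is proved, stated in full; the proofs are below) =====
def Claim_equal_control_bancario : Prop := ∀ (xl : List (String × Int)), Dom_control_bancario xl → Spec_control_bancario xl (control_bancario xl)

-- ===== LEMMAS AND PROOFS =====

-- ===== VERDICT (by name: the statement is the Claim_ definition above) =====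
theorem foldl_shift (xl : List (String × Int)) (a : Int) :
    xl.foldl (fun acc i =>
      let acc := if i.1 == "I" then acc + i.2 else acc
      if i.1 == "R" then acc - i.2 else acc) a
    = a + xl.foldl (fun acc i =>
      let acc := if i.1 == "I" then acc + i.2 else acc
      if i.1 == "R" then acc - i.2 else acc) 0 := by
  induction xl generalizing a with
  | nil => simp
  | cons h t ih =>
    simp only [List.foldl_cons]
    rw [ih, ih (if h.1 == "R" then _ else _)]
    split_ifs <;> ring

theorem fold_eq_sums (xl : List (String × Int)) :
    xl.foldl (fun acc i =>
      let acc := if i.1 == "I" then acc + i.2 else acc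
      if i.1 == "R" then acc - i.2 else acc) 0
    = ((xl.filter (fun p => p.1 == "I")).map (·.2)).sum
      - ((xl.filter (fun p => p.1 == "R")).map (·.2)).sum := by
  induction xl with
  | nil => simp
  | cons h t ih =>
    rw [List.foldl_cons, foldl_shift, ih]
    by_cases hI : h.1 == "I" <;> by_cases hR : h.1 == "R" <;>
      simp [hI, hR] <;> omega

theorem control_bancario_spec : Claim_equal_control_bancario := by
  intro xl _
  unfold Spec_control_bancario control_bancario control_bancario_alt
  exact fold_eq_sums xl
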